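-- pv_equiv track=rewrite | github.com/MVvdV/shmail | shmail/services/draft_preview.py | to_rendered_markdown_preview
-- ===== SOURCE A (Python) =====
-- def to_rendered_markdown_preview(text: str) -> str:
--     """Normalize draft text for markdown rendering without escape artifacts.
--
--     Behavior goals:
--     - Preserve regular single-line breaks for non-empty lines.
--     - Keep fenced code blocks untouched.
--     - Allow markdown renderer to collapse excessive empty lines naturally.
--     """
--
--     lines = text.split("\n")
--     if not lines:
--         return ""
--
--     output: list[str] = []
--     in_fence = False
--
--     for index, line in enumerate(lines):
--         stripped = line.strip()
--         if stripped.startswith("```"):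
--             in_fence = not in_fence
--             output.append(line)
--             continue
--
--         if in_fence:
--             output.append(line)
--             continue
--
--         if line == "":
--             output.append("")
--             continue
--
--         next_line = lines[index + 1] if index + 1 < len(lines) else None
--         if next_line is not None and next_line != "":
--             output.append(f"{line}  ")
--         else:
--             output.append(line)
--
--     return "\n".join(output)
-- ===== SOURCE B (Python) =====
-- def to_rendered_markdown_preview(text: str) -> str:
--     """One forward pass, no lookahead: patch the previous output entry instead of looking ahead."""
--     output: list[str] = []
--     in_fence = False
--     prev_content = False  # tracks whether the last appended entry is eligible for trailing spaces
--     for line in text.split("\n"):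
--         if line != "" and prev_content:
--             output[-1] += "  "
--         stripped = line.strip()
--         if stripped.startswith("```"):
--             in_fence = not in_fence
--             output.append(line)
--             prev_content = False
--         elif in_fence or line == "":
--             output.append(line)
--             prev_content = False
--         else:
--             output.append(line)
--             prev_content = True
--     return "\n".join(output)
-- ===== Notes on version B (the rewrite author's own statement) =====
-- stated objective: alternative
-- what changed: Replaced A's lookahead (indexing lines[index+1] for each content line) by a single forward pass carrying a flag for whether the last appended entry was a plain content line, patching that entry with the trailing two spaces once the current line turns out non-empty.
import Mathlib
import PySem

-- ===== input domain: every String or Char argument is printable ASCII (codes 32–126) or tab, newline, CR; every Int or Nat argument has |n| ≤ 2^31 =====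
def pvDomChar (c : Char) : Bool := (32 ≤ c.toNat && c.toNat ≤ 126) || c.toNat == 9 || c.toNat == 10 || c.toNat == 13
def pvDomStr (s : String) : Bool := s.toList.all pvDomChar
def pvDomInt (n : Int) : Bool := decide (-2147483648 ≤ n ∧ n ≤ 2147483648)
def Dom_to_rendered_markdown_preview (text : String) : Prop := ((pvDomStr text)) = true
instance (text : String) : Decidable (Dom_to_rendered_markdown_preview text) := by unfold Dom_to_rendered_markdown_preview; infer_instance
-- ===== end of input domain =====

-- B replaces A's lookahead at lines[index+1] by a single forward pass that patches the
-- previously appended entry; objective: alternative decomposition, same cost.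

-- ===== PORT A =====
-- A's loop over `enumerate(lines)`: structural recursion on the remaining lines;
-- `lines[index+1] if index+1 < len(lines) else None` is exactly the head of the rest.
def pvALoop (inFence : Bool) (rest : List String) : List String :=
  match rest with
  | [] => []
  | line :: rest' =>
    if PySem.Str.startswith (PySem.Str.strip line) "```" then
      line :: pvALoop (!inFence) rest'
    else if inFence then
      line :: pvALoop inFence rest'
    else if line = "" then
      "" :: pvALoop inFence rest'
    else
      match rest'.head? with
      | some nl => if nl ≠ "" then (line ++ "  ") :: pvALoop inFence rest'
                   else line :: pvALoop inFence rest'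
      | none => line :: pvALoop inFence rest'

def to_rendered_markdown_preview (text : String) : String :=
  let lines := (PySem.Str.split? text "\n").getD []   -- sep "\n" ≠ "", so split? is `some`
  if lines = [] then ""
  else PySem.Str.join "\n" (pvALoop false lines)

-- ===== PORT B =====
-- state: (output in reverse, in_fence, prev_content); `output[-1] += "  "` patches the head.
def pvBStep (st : List String × Bool × Bool) (line : String) : List String × Bool × Bool :=
  let out := if line ≠ "" ∧ st.2.2 = true then
               match st.1 with
               | h :: t => (h ++ "  ") :: t
               | [] => []
             else st.1
  if PySem.Str.startswith (PySem.Str.strip line) "```" then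
    (line :: out, !st.2.1, false)
  else if st.2.1 || line = "" then
    (line :: out, st.2.1, false)
  else
    (line :: out, st.2.1, true)

def to_rendered_markdown_preview_alt (text : String) : String :=
  let st := ((PySem.Str.split? text "\n").getD []).foldl pvBStep ([], false, false)
  PySem.Str.join "\n" st.1.reverse

-- ===== PRECONDITION & SPEC =====
def Spec_to_rendered_markdown_preview (text : String) (out : String) : Prop := out = to_rendered_markdown_preview_alt text
instance (text : String) (out : String) : Decidable (Spec_to_rendered_markdown_preview text out) := by unfold Spec_to_rendered_markdown_preview; infer_instance

-- ===== CLAIM (what is proved, stated in full; the proofs are below) =====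
def Claim_equal_to_rendered_markdown_preview : Prop := ∀ (text : String), Dom_to_rendered_markdown_preview text → Spec_to_rendered_markdown_preview text (to_rendered_markdown_preview text)

-- ===== LEMMAS AND PROOFS =====

-- the deferred patch that B's `prev_content` flag encodes
def pvBump (out : List String) (b : Bool) : List String :=
  if b then
    match out with
    | h :: t => (h ++ "  ") :: t
    | [] => []
  else out

-- "the upcoming line is non-empty" — the trigger for the patch
def pvHead (rest : List String) : Bool :=
  match rest with
  | l :: _ => !(l == "")
  | [] => false

lemma pvBStep_fst (out : List String) (inFence p : Bool) (line : String) :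
    pvBStep (out, inFence, p) line
      = (line :: pvBump out (p && !(line == "")),
         if PySem.Str.startswith (PySem.Str.strip line) "```" then !inFence else inFence,
         if PySem.Str.startswith (PySem.Str.strip line) "```" then false
         else if inFence || line == "" then false else true) := by
  by_cases hl : line = "" <;> cases p <;>
    simp only [pvBStep, pvBump, hl] <;>
    by_cases hf : PySem.Str.startswith (PySem.Str.strip line) "```" = true <;>
    cases inFence <;> simp_all

lemma pvB_invariant (rest : List String) :
    ∀ (out : List String) (inFence p : Bool),
    (rest.foldl pvBStep (out, inFence, p)).1
      = (pvALoop inFence rest).reverse ++ pvBump out (p && pvHead rest) := by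
  induction rest with
  | nil => intro out inFence p; simp [pvALoop, pvBump, pvHead]
  | cons line rest' ih =>
    intro out inFence p
    rw [List.foldl_cons, pvBStep_fst, ih]
    by_cases hf : PySem.Str.startswith (PySem.Str.strip line) "```" = true
    · simp only [pvALoop, hf, if_true, if_pos, List.reverse_cons, pvHead]
      simp [pvBump]
    · by_cases hin : inFence = true
      · simp only [pvALoop, hf, hin, if_false, if_true, List.reverse_cons, pvHead]
        simp [hf, pvBump]
      · have hinb : inFence = false := by simpa using hin
        by_cases hl : line = ""
        · subst hl
          simp only [pvALoop, hf, hinb, if_false, List.reverse_cons, pvHead]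
          simp [hf, pvBump]
        · cases rest' with
          | nil =>
            simp only [pvALoop, hf, hinb, hl, if_false, List.reverse_cons, pvHead,
              List.head?, pvBump]
            simp [hf, hl, pvBump]
          | cons nl rs =>
            by_cases hnl : nl = ""
            · subst hnl
              simp only [pvALoop, hf, hinb, hl, List.head?, pvHead]
              simp [hf, hl, pvBump, pvHead]
            · simp only [pvALoop, hf, hinb, hl, List.head?, pvHead]
              simp [hf, hl, hnl, pvBump, pvHead]

lemma pv_main (text : String) :
    to_rendered_markdown_preview text = to_rendered_markdown_preview_alt text := by
  simp only [to_rendered_markdown_preview, to_rendered_markdown_preview_alt]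
  rw [pvB_invariant]
  by_cases hl : (PySem.Str.split? text "\n").getD [] = []
  · simp [hl, pvALoop, pvBump, pvHead, PySem.Str.join]
  · simp [hl, pvBump]

-- ===== VERDICT (by name: the statement is the Claim_ definition above) =====
theorem to_rendered_markdown_preview_spec : Claim_equal_to_rendered_markdown_preview := by
  intro text _
  unfold Spec_to_rendered_markdown_preview
  exact pv_main text
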